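-- pv_equiv track=rewrite | github.com/HolyTeamOrg/LogicPic-Game-Solver | python/main.py | translate_per
-- ===== SOURCE A (Python) =====
-- def translate_per(permu):
--     """ Given bool notation (1,0,0,1,1) --> [1,2]
--
--       :type permu: list or tuple of integers
--       :param permu: the permutation in boolean notation
--       :return: list
--
--       :example:
--       >>> translate_per([0, 0, 1, 1, 0, 1, 0, 1, 1, 1])
--       >>> [2,1,3]
--       """
--     cnt = 0
--     ls = []
--     for i in permu:
--         if i:
--             cnt = cnt + 1
--         else:
--             ls.append(cnt)
--             cnt = 0
--     ls.append(cnt)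
--     return list(filter((0).__ne__, ls))
-- ===== SOURCE B (Python) =====
-- def translate_per(permu):
--     """Run-length counts of maximal truthy runs, by scanning each run at once."""
--     def runs(xs):
--         if not xs:
--             return []
--         if xs[0]:
--             j = 1
--             while j < len(xs) and xs[j]:
--                 j += 1
--             return [j] + runs(xs[j:])
--         return runs(xs[1:])
--     return runs(list(permu))
-- ===== Notes on version B (the rewrite author's own statement) =====
-- stated objective: alternative
-- what changed: Replaces A's running counter with zero-sentinel appends and a final filter pass by a direct run-scanner that emits each maximal truthy run's length as it finds it, with no counter state, sentinel list or filter.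
import Mathlib
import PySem

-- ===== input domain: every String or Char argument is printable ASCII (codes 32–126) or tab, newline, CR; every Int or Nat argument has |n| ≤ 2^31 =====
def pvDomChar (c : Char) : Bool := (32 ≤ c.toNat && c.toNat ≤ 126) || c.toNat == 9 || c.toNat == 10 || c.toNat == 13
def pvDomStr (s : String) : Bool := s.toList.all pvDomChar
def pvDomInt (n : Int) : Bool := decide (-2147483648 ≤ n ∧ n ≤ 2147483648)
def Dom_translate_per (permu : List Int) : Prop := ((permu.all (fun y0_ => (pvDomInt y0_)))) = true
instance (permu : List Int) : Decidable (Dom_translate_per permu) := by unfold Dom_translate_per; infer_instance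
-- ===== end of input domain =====

-- B replaces A's running counter + zero-sentinel appends + final filter by a direct
-- scanner that emits each maximal truthy run's length (alternative decomposition).

-- ===== PORT A =====
-- the loop body: cnt/ls state, truthiness of an int is ≠ 0
def pvStepA (s : Int × List Int) (i : Int) : Int × List Int :=
  if i ≠ 0 then (s.1 + 1, s.2) else (0, s.2 ++ [s.1])

def translate_per (permu : List Int) : List Int :=
  let st := permu.foldl pvStepA (0, [])
  (st.2 ++ [st.1]).filter (fun x => x ≠ 0)

-- ===== PORT B =====
-- runs: if the head is truthy, the inner while loop counts the whole truthy prefix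
-- (takeWhile), recursion continues on the rest (dropWhile); else skip the head.
def pvRuns : List Int → List Int
  | [] => []
  | x :: xs =>
    if x ≠ 0 then
      (1 + ((xs.takeWhile (fun y => y ≠ 0)).length : Int))
        :: pvRuns (xs.dropWhile (fun y => y ≠ 0))
    else pvRuns xs
termination_by xs => xs.length
decreasing_by
· simpa using Nat.lt_succ_of_le (List.length_dropWhile_le _ _)
· simp

def translate_per_alt (permu : List Int) : List Int := pvRuns permu

-- ===== PRECONDITION & SPEC =====
def Spec_translate_per (permu : List Int) (out : List Int) : Prop := out = translate_per_alt permu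
instance (permu : List Int) (out : List Int) : Decidable (Spec_translate_per permu out) := by unfold Spec_translate_per; infer_instance

-- ===== CLAIM (what is proved, stated in full; the proofs are below) =====
def Claim_equal_translate_per : Prop := ∀ (permu : List Int), Dom_translate_per permu → Spec_translate_per permu (translate_per permu)

-- ===== LEMMAS AND PROOFS =====

-- counter-carrying version of pvRuns, matching A's fold state
def pvRunsC : Int → List Int → List Int
  | c, [] => if c ≠ 0 then [c] else []
  | c, x :: xs =>
    if x ≠ 0 then pvRunsC (c + 1) xs
    else (if c ≠ 0 then [c] else []) ++ pvRunsC 0 xs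

theorem pvRunsC_spec (xs : List Int) :
    (∀ c : Int, 0 < c → pvRunsC c xs =
      (c + ((xs.takeWhile (fun y => y ≠ 0)).length : Int))
        :: pvRuns (xs.dropWhile (fun y => y ≠ 0)))
    ∧ pvRunsC 0 xs = pvRuns xs := by
  induction xs with
  | nil =>
    refine ⟨fun c hc => by simp [pvRunsC, pvRuns]; omega, by simp [pvRunsC, pvRuns]⟩
  | cons x t ih =>
    constructor
    · intro c hc
      by_cases hx : x = 0
      · simp only [pvRunsC, hx]
        simp [List.takeWhile, List.dropWhile, ih.2, pvRuns, ne_eq, hc.ne']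
      · have h1 := ih.1 (c + 1) (by omega)
        simp only [pvRunsC, hx, if_pos, ne_eq, not_false_iff, h1,
          List.takeWhile, List.dropWhile]
        simp
        ring
    · by_cases hx : x = 0
      · simp [pvRunsC, hx, ih.2, pvRuns]
      · have h1 := ih.1 1 one_pos
        simp [pvRunsC, hx, h1, pvRuns]

-- A's fold, run from any state with nonnegative counter, produces the filtered
-- sentinel list = already-emitted runs plus the counter-carrying runs of the rest
theorem pvFold_spec (xs : List Int) : ∀ (cnt : Int) (ls : List Int), 0 ≤ cnt →
    (let st := xs.foldl pvStepA (cnt, ls)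
     (st.2 ++ [st.1]).filter (fun x => x ≠ 0))
      = ls.filter (fun x => x ≠ 0) ++ pvRunsC cnt xs := by
  induction xs with
  | nil =>
    intro cnt ls h
    by_cases hc : cnt = 0 <;> simp [pvRunsC, hc, List.filter_append]
  | cons x t ih =>
    intro cnt ls h
    by_cases hx : x = 0
    · simp only [List.foldl_cons, pvStepA, hx, ne_eq, not_true_eq_false, if_false]
      have := ih 0 (ls ++ [cnt]) le_rfl
      simp only [this, List.filter_append, pvRunsC]
      by_cases hc : cnt = 0 <;> simp [hc, List.append_assoc]
    · simp only [List.foldl_cons, pvStepA, hx, ne_eq, not_false_iff, if_true]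
      have := ih (cnt + 1) ls (by omega)
      simp only [this, pvRunsC]
      simp [hx]

theorem translate_per_spec : Claim_equal_translate_per := by
  intro permu _
  unfold Spec_translate_per translate_per translate_per_alt
  have := pvFold_spec permu 0 [] le_rfl
  simp only [this, (pvRunsC_spec permu).2, List.filter_nil, List.nil_append]
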